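-- pv_equiv track=rewrite | github.com/get-to-work-together/Defensie-Python-Traject | Cursus/Dag 3/passwords.py | check_password_requirements
-- ===== SOURCE A (Python) =====
-- import string
--
-- def check_password_requirements(password: str,
--                    n_lower: int = 3,
--                    n_upper: int = 3,
--                    n_digits: int = 1,
--                    n_special: int = 1,
--                    minimum_length: int = 12) -> bool:
--     """
--     Check if a password meets the specified security requirements.
--
--     The password must contain at least:
--         - `n_lower` lowercase letters
--         - `n_upper` uppercase letters
--         - `n_digits` numeric digits
--         - `n_special` special characters (punctuation)
--     and have a total length of at least `minimum_length`.
--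
--     Args:
--         password (str): The password string to validate.
--         n_lower (int, optional): Minimum number of lowercase letters. Defaults to 3.
--         n_upper (int, optional): Minimum number of uppercase letters. Defaults to 3.
--         n_digits (int, optional): Minimum number of digits. Defaults to 1.
--         n_special (int, optional): Minimum number of special characters. Defaults to 1.
--         minimum_length (int, optional): Minimum required total length of the password. Defaults to 12.
--
--     Returns:
--         bool: True if the password meets all requirements, False otherwise.
--
--     Example:
--         >>> check_password("Abc123!@#", n_lower=2, n_upper=1, n_digits=2, n_special=2, minimum_length=8)
--         True
--
--         >>> check_password("abc123", n_lower=2, n_upper=1, n_digits=2, n_special=1, minimum_length=8)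
--         False
--     """
--
--     if len([c for c in password if c in string.ascii_lowercase]) < n_lower:
--         return False
--
--     if len([c for c in password if c in string.ascii_uppercase]) < n_upper:
--         return False
--
--     if len([c for c in password if c in string.digits]) < n_digits:
--         return False
--
--     if len([c for c in password if c in string.punctuation]) < n_special:
--         return False
--
--     if len(password) < minimum_length:
--         return False
--
--     return True
-- ===== SOURCE B (Python) =====
-- import string
--
-- def check_password_requirements(password: str,
--                    n_lower: int = 3,
--                    n_upper: int = 3,
--                    n_digits: int = 1,
--                    n_special: int = 1,
--                    minimum_length: int = 12) -> bool:
--     # One pass: tally each character class, then check all thresholds at once.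
--     lower = upper = digits = special = 0
--     for c in password:
--         lower += c in string.ascii_lowercase
--         upper += c in string.ascii_uppercase
--         digits += c in string.digits
--         special += c in string.punctuation
--     return (lower >= n_lower and upper >= n_upper and digits >= n_digits
--             and special >= n_special and len(password) >= minimum_length)
-- ===== Notes on version B (the rewrite author's own statement) =====
-- stated objective: simpler
-- what changed: Replaces four separate filter-and-count passes with an early-return chain by a single pass that tallies all four character classes and one final conjunction of the threshold checks.
import Mathlib
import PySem

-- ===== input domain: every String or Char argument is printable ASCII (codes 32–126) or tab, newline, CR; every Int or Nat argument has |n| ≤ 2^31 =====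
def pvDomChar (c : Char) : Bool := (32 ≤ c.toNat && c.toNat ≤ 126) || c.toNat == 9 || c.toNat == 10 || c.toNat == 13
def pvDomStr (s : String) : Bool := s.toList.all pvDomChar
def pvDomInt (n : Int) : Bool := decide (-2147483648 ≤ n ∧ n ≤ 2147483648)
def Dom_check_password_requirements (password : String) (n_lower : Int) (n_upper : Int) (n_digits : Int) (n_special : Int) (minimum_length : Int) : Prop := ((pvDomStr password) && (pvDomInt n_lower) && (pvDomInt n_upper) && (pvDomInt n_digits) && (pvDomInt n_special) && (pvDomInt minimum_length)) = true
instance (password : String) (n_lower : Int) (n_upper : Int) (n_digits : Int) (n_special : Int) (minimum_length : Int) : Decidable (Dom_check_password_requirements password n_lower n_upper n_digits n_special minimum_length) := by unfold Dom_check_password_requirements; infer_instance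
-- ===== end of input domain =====

-- ===== PORT A =====
-- B replaces A's four separate filter-count passes by one tallying pass; objective: simpler.
-- shared constants = string.ascii_lowercase / ascii_uppercase / digits / punctuation
def pvLower : List Char := "abcdefghijklmnopqrstuvwxyz".toList
def pvUpper : List Char := "ABCDEFGHIJKLMNOPQRSTUVWXYZ".toList
def pvDigits : List Char := "0123456789".toList
def pvPunct : List Char := "!\"#$%&'()*+,-./:;<=>?@[\\]^_`{|}~".toList

def check_password_requirements (password : String) (n_lower : Int) (n_upper : Int) (n_digits : Int) (n_special : Int) (minimum_length : Int) : Bool :=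
  if ((password.toList.filter (fun c => pvLower.contains c)).length : Int) < n_lower then false
  else if ((password.toList.filter (fun c => pvUpper.contains c)).length : Int) < n_upper then false
  else if ((password.toList.filter (fun c => pvDigits.contains c)).length : Int) < n_digits then false
  else if ((password.toList.filter (fun c => pvPunct.contains c)).length : Int) < n_special then false
  else if ((password.toList.length : Int) < minimum_length) then false
  else true

-- ===== PORT B =====
-- one step of B's single loop: add the 0/1 class indicators to the four tallies
def pvStep (st : Int × Int × Int × Int) (c : Char) : Int × Int × Int × Int :=
  (st.1 + (if pvLower.contains c then 1 else 0),
   st.2.1 + (if pvUpper.contains c then 1 else 0),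
   st.2.2.1 + (if pvDigits.contains c then 1 else 0),
   st.2.2.2 + (if pvPunct.contains c then 1 else 0))

def check_password_requirements_alt (password : String) (n_lower : Int) (n_upper : Int) (n_digits : Int) (n_special : Int) (minimum_length : Int) : Bool :=
  let r := password.toList.foldl pvStep (0, 0, 0, 0)
  decide (n_lower ≤ r.1 ∧ n_upper ≤ r.2.1 ∧ n_digits ≤ r.2.2.1 ∧
          n_special ≤ r.2.2.2 ∧ minimum_length ≤ (password.toList.length : Int))

-- ===== PRECONDITION & SPEC =====
def Spec_check_password_requirements (password : String) (n_lower : Int) (n_upper : Int) (n_digits : Int) (n_special : Int) (minimum_length : Int) (out : Bool) : Prop := out = check_password_requirements_alt password n_lower n_upper n_digits n_special minimum_length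
instance (password : String) (n_lower : Int) (n_upper : Int) (n_digits : Int) (n_special : Int) (minimum_length : Int) (out : Bool) : Decidable (Spec_check_password_requirements password n_lower n_upper n_digits n_special minimum_length out) := by unfold Spec_check_password_requirements; infer_instance

-- ===== CLAIM (what is proved, stated in full; the proofs are below) =====
def Claim_equal_check_password_requirements : Prop := ∀ (password : String) (n_lower : Int) (n_upper : Int) (n_digits : Int) (n_special : Int) (minimum_length : Int), Dom_check_password_requirements password n_lower n_upper n_digits n_special minimum_length → Spec_check_password_requirements password n_lower n_upper n_digits n_special minimum_length (check_password_requirements password n_lower n_upper n_digits n_special minimum_length)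

-- ===== LEMMAS AND PROOFS =====

-- the fold computes the four filter-counts, shifted by the start state
theorem pvStep_foldl (l : List Char) (a b c d : Int) :
    l.foldl pvStep (a, b, c, d) =
      (a + ((l.filter (fun c => pvLower.contains c)).length : Int),
       b + ((l.filter (fun c => pvUpper.contains c)).length : Int),
       c + ((l.filter (fun c => pvDigits.contains c)).length : Int),
       d + ((l.filter (fun c => pvPunct.contains c)).length : Int)) := by
  induction l generalizing a b c d with
  | nil => simp
  | cons x xs ih =>
    simp only [List.foldl_cons, pvStep, List.filter_cons]
    rw [ih]
    split_ifs <;> simp [Prod.ext_iff] <;> omega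

-- ===== VERDICT (by name: the statement is the Claim_ definition above) =====
theorem check_password_requirements_spec : Claim_equal_check_password_requirements := by
  intro password n_lower n_upper n_digits n_special minimum_length _
  unfold Spec_check_password_requirements check_password_requirements check_password_requirements_alt
  rw [pvStep_foldl]
  simp only [zero_add, List.contains_eq_mem, String.length_toList]
  split_ifs with h1 h2 h3 h4 h5 <;> simp <;> omega
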